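-- pv_equiv track=rewrite | github.com/K11Cham/performance-lens | src/app/study_schedule.py | normalize_availability_payload
-- ===== SOURCE A (Python) =====
-- def time_str_to_minutes(s: str) -> int:
--     s = (s or '').strip()
--     parts = s.split(':')
--     h = int(parts[0])
--     m = int(parts[1]) if len(parts) > 1 else 0
--     return max(0, min(24 * 60, h * 60 + m))
--
-- def normalize_availability_payload(raw: dict) -> dict[int, list[tuple[int, int]]]:
--     """JSON keys '0'..'6' -> list of (start_min, end_min) non-overlapping sorted."""
--     out: dict[int, list[tuple[int, int]]] = {i: [] for i in range(7)}
--     for key, slots in (raw or {}).items():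
--         try:
--             d = int(key)
--         except (TypeError, ValueError):
--             continue
--         if d < 0 or d > 6:
--             continue
--         if not isinstance(slots, list):
--             continue
--         for slot in slots:
--             if not isinstance(slot, (list, tuple)) or len(slot) < 2:
--                 continue
--             a = time_str_to_minutes(str(slot[0]))
--             b = time_str_to_minutes(str(slot[1]))
--             if b <= a:
--                 continue
--             out[d].append((a, b))
--     for d in out:
--         out[d].sort(key=lambda x: x[0])
--         merged: list[tuple[int, int]] = []
--         for rs, re in out[d]:
--             if not merged or rs > merged[-1][1]:
--                 merged.append((rs, re))
--             else:
--                 merged[-1] = (merged[-1][0], max(merged[-1][1], re))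
--         out[d] = merged
--     return out
-- ===== SOURCE B (Python) =====
-- # Same parsing/validation as the original; per-day boolean minute-coverage bitmap
-- # replaces the collect-sort-merge pipeline: runs of covered minutes are the merged intervals.
--
-- def time_str_to_minutes(s: str) -> int:
--     s = (s or '').strip()
--     parts = s.split(':')
--     h = int(parts[0])
--     m = int(parts[1]) if len(parts) > 1 else 0
--     return max(0, min(24 * 60, h * 60 + m))
--
-- def normalize_availability_payload(raw: dict) -> dict[int, list[tuple[int, int]]]:
--     """JSON keys '0'..'6' -> list of (start_min, end_min) non-overlapping sorted."""
--     cov = {d: [False] * (24 * 60) for d in range(7)}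
--     for key, slots in (raw or {}).items():
--         try:
--             d = int(key)
--         except (TypeError, ValueError):
--             continue
--         if d < 0 or d > 6:
--             continue
--         if not isinstance(slots, list):
--             continue
--         for slot in slots:
--             if not isinstance(slot, (list, tuple)) or len(slot) < 2:
--                 continue
--             a = time_str_to_minutes(str(slot[0]))
--             b = time_str_to_minutes(str(slot[1]))
--             if b <= a:
--                 continue
--             for m in range(a, b):
--                 cov[d][m] = True
--     out: dict[int, list[tuple[int, int]]] = {}
--     for d in range(7):
--         runs: list[tuple[int, int]] = []
--         start = None
--         for m in range(24 * 60 + 1):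
--             c = m < 24 * 60 and cov[d][m]
--             if c and start is None:
--                 start = m
--             elif not c and start is not None:
--                 runs.append((start, m))
--                 start = None
--         out[d] = runs
--     return out
-- ===== Notes on version B (the rewrite author's own statement) =====
-- stated objective: alternative
-- what changed: B keeps A's parsing/validation loop but replaces the per-day collect-then-sort-then-merge pipeline with a per-day boolean minute-coverage bitmap: each accepted interval marks its minutes, and the merged sorted intervals are read off as maximal covered runs in a single left-to-right scan.
import Mathlib
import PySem

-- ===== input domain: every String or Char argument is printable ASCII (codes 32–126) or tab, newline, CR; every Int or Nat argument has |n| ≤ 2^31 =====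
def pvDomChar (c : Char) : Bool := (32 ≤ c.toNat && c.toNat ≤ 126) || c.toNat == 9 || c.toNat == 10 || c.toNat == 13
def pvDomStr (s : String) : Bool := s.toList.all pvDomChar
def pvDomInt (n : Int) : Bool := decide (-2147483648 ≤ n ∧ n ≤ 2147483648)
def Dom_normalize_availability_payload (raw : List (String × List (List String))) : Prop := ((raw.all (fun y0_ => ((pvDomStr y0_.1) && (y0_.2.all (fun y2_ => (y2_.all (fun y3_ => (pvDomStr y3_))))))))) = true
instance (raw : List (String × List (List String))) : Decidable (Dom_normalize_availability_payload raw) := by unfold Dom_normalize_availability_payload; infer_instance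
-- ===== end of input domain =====

-- B replaces A's per-day collect/sort/merge pipeline by a per-day boolean minute-coverage
-- function whose maximal covered runs are emitted by a single left-to-right scan (objective:
-- alternative data structure, same result).

-- ===== PORT A =====

-- time_str_to_minutes (shared module helper): returns none where Python's int() raises ValueError
def tsm? (s : String) : Option Int :=
  let s := PySem.Str.strip s          -- '(s or "").strip()': for a str argument this is s.strip()
  let parts := (PySem.Str.split? s ":").getD []   -- s.split(':'); sep nonempty, so split? = some
  match PySem.Int.ofStr? (PySem.List.pyGetD parts 0 "") with
  | none => none
  | some h =>
    match (if parts.length > 1 then PySem.Int.ofStr? (PySem.List.pyGetD parts 1 "") else some 0) with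
    | none => none
    | some m => some (max 0 (min (24 * 60) (h * 60 + m)))

-- the body of 'for slot in slots' (key already parsed to day d)
def slotStepA (d : Int) (out : PySem.Dict Int (List (Int × Int))) (slot : List String) :
    PySem.Dict Int (List (Int × Int)) :=
  if slot.length < 2 then out
  else
    match tsm? (PySem.List.pyGetD slot 0 ""), tsm? (PySem.List.pyGetD slot 1 "") with
    | some a, some b => if b ≤ a then out else out.modify d [] (fun l => l ++ [(a, b)])
    | _, _ => out    -- Python raises ValueError here; excluded by Pre_

-- the body of 'for key, slots in raw.items()'
def dayStepA (out : PySem.Dict Int (List (Int × Int))) (kv : String × List (List String)) :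
    PySem.Dict Int (List (Int × Int)) :=
  match PySem.Int.ofStr? kv.1 with
  | none => out
  | some d => if d < 0 ∨ d > 6 then out else kv.2.foldl (slotStepA d) out

-- one step of A's merge loop ('merged[-1]' is getLast?)
def mergeStepA (merged : List (Int × Int)) (p : Int × Int) : List (Int × Int) :=
  match merged.getLast? with
  | none => merged ++ [p]
  | some q => if p.1 > q.2 then merged ++ [p]
              else merged.dropLast ++ [(q.1, max q.2 p.2)]

def initA : PySem.Dict Int (List (Int × Int)) :=
  PySem.Dict.ofList ((PySem.List.pyRange 0 7 1).map (fun i => (i, ([] : List (Int × Int)))))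

def normalize_availability_payload (raw : List (String × List (List String))) : List (Int × List (Int × Int)) :=
  ((raw.foldl dayStepA initA).items).map
    (fun p => (p.1, (PySem.List.sorted p.2 (fun x => x.1) false).foldl mergeStepA []))

-- ===== PORT B =====

-- 'for m in range(a, b): cov[d][m] = True', expressed pointwise on the coverage function
def markB (f : Int → Bool) (a b : Int) : Int → Bool :=
  fun m => if a ≤ m ∧ m < b then true else f m

def slotStepB (d : Int) (cov : PySem.Dict Int (Int → Bool)) (slot : List String) :
    PySem.Dict Int (Int → Bool) :=
  if slot.length < 2 then cov
  else
    match tsm? (PySem.List.pyGetD slot 0 ""), tsm? (PySem.List.pyGetD slot 1 "") with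
    | some a, some b => if b ≤ a then cov else cov.modify d (fun _ => false) (fun f => markB f a b)
    | _, _ => cov    -- Python raises ValueError here; excluded by Pre_

def dayStepB (cov : PySem.Dict Int (Int → Bool)) (kv : String × List (List String)) :
    PySem.Dict Int (Int → Bool) :=
  match PySem.Int.ofStr? kv.1 with
  | none => cov
  | some d => if d < 0 ∨ d > 6 then cov else kv.2.foldl (slotStepB d) cov

-- one minute of B's run-emitting scan (st = (runs, start))
def runsStep (f : Int → Bool) (st : List (Int × Int) × Option Int) (m : Nat) :
    List (Int × Int) × Option Int :=
  let c : Bool := decide (m < 24 * 60) && f (m : Int)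
  match st.2 with
  | none => if c then (st.1, some (m : Int)) else st
  | some s => if c then st else (st.1 ++ [(s, (m : Int))], none)

-- the scan over minutes 0 .. 24*60 (inclusive)
def runsOf (f : Int → Bool) : List (Int × Int) :=
  ((List.range (24 * 60 + 1)).foldl (runsStep f) ([], none)).1

def initB : PySem.Dict Int (Int → Bool) :=
  PySem.Dict.ofList ((PySem.List.pyRange 0 7 1).map (fun i => (i, fun _ => false)))

def normalize_availability_payload_alt (raw : List (String × List (List String))) : List (Int × List (Int × Int)) :=
  (PySem.List.pyRange 0 7 1).map
    (fun d => (d, runsOf ((raw.foldl dayStepB initB).getD d (fun _ => false))))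

-- ===== PRECONDITION & SPEC =====

-- a string on which int() succeeds
def intLike (s : String) : Bool := (PySem.Int.ofStr? s).isSome
-- a string time_str_to_minutes accepts without raising
def timeOk (s : String) : Bool :=
  let parts := (PySem.Str.split? (PySem.Str.strip s) ":").getD []
  intLike (parts.getD 0 "") && (decide (parts.length ≤ 1) || intLike (parts.getD 1 ""))

-- Pre_ excludes exactly the inputs on which Python A raises ValueError: a slot of length ≥ 2,
-- under a key parsing to a day 0..6, whose first or second entry time_str_to_minutes cannot parse.
def Pre_normalize_availability_payload (raw : List (String × List (List String))) : Prop :=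
  (raw.all (fun kv =>
    match PySem.Int.ofStr? kv.1 with
    | none => true
    | some d =>
      if d < 0 ∨ d > 6 then true
      else kv.2.all (fun slot =>
        decide (slot.length < 2) || (timeOk (slot.getD 0 "") && timeOk (slot.getD 1 ""))))) = true
instance (raw : List (String × List (List String))) : Decidable (Pre_normalize_availability_payload raw) := by
  unfold Pre_normalize_availability_payload; infer_instance

def pvWitness_normalize_availability_payload : (List (String × List (List String))) :=
  [("0", [["9:00", "10:30"], ["10:00", "12:00"]]), ("3", [["22", "23:15"]])]

def Spec_normalize_availability_payload (raw : List (String × List (List String))) (out : List (Int × List (Int × Int))) : Prop := out = normalize_availability_payload_alt raw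
instance (raw : List (String × List (List String))) (out : List (Int × List (Int × Int))) : Decidable (Spec_normalize_availability_payload raw out) := by unfold Spec_normalize_availability_payload; infer_instance

-- ===== CLAIM (what is proved, stated in full; the proofs are below) =====
def Claim_equal_normalize_availability_payload : Prop := ∀ (raw : List (String × List (List String))), Dom_normalize_availability_payload raw → Pre_normalize_availability_payload raw → Spec_normalize_availability_payload raw (normalize_availability_payload raw)

-- ===== LEMMAS AND PROOFS =====

-- the minute-coverage function of a list of intervals
def covOf (L : List (Int × Int)) (m : Int) : Bool := L.any (fun p => decide (p.1 ≤ m ∧ m < p.2))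

-- canonical interval representation of a coverage function: sorted, strictly separated,
-- nonempty intervals with nonnegative starts, covering exactly f
def Canon (f : Int → Bool) (M : List (Int × Int)) : Prop :=
  M.Pairwise (fun p q => p.2 < q.1) ∧ (∀ p ∈ M, 0 ≤ p.1 ∧ p.1 < p.2) ∧ (∀ m, f m = covOf M m)

theorem canon_congr {f g : Int → Bool} {M : List (Int × Int)} (h : ∀ m, f m = g m)
    (hC : Canon f M) : Canon g M := by
  obtain ⟨h1, h2, h3⟩ := hC
  exact ⟨h1, h2, fun m => (h m).symm.trans (h3 m)⟩

theorem canon_head_true {f : Int → Bool} {s e : Int} {r : List (Int × Int)}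
    (h : Canon f ((s, e) :: r)) : f s = true := by
  obtain ⟨_, hb, hc⟩ := h
  have hse := (hb (s, e) (List.mem_cons_self)).2
  rw [hc s]
  simp only [covOf, List.any_cons, Bool.or_eq_true, decide_eq_true_eq]
  exact Or.inl ⟨le_rfl, hse⟩

theorem canon_lb {f : Int → Bool} {s e : Int} {r : List (Int × Int)}
    (h : Canon f ((s, e) :: r)) : ∀ m, f m = true → s ≤ m := by
  obtain ⟨hp, hb, hc⟩ := h
  intro m hm
  rw [hc m] at hm
  simp only [covOf, List.any_cons, Bool.or_eq_true, decide_eq_true_eq, List.any_eq_true] at hm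
  have hse := (hb (s, e) (List.mem_cons_self)).2
  rcases hm with h' | ⟨q, hq, h'⟩
  · exact h'.1
  · have := (List.pairwise_cons.mp hp).1 q hq
    omega

theorem canon_mid_true {f : Int → Bool} {s e : Int} {r : List (Int × Int)}
    (h : Canon f ((s, e) :: r)) : ∀ m, s ≤ m → m < e → f m = true := by
  obtain ⟨_, _, hc⟩ := h
  intro m h1 h2
  rw [hc m]
  simp only [covOf, List.any_cons, Bool.or_eq_true, decide_eq_true_eq]
  exact Or.inl ⟨h1, h2⟩

theorem canon_end_false {f : Int → Bool} {s e : Int} {r : List (Int × Int)}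
    (h : Canon f ((s, e) :: r)) : f e = false := by
  obtain ⟨hp, hb, hc⟩ := h
  rw [hc e]
  unfold covOf
  rw [List.any_cons]
  have h1 : decide ((s, e).1 ≤ e ∧ e < (s, e).2) = false := by
    simp only [decide_eq_false_iff_not]
    omega
  have h2 : r.any (fun p => decide (p.1 ≤ e ∧ e < p.2)) = false := by
    apply List.any_eq_false.mpr
    intro q hq
    have := (List.pairwise_cons.mp hp).1 q hq
    simp only [decide_eq_true_eq]
    omega
  rw [h1, h2]
  rfl

theorem canon_tail {f : Int → Bool} {s e : Int} {r : List (Int × Int)}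
    (h : Canon f ((s, e) :: r)) : Canon (fun m => decide (e ≤ m) && f m) r := by
  obtain ⟨hp, hb, hc⟩ := h
  obtain ⟨hcr, hpr⟩ := List.pairwise_cons.mp hp
  refine ⟨hpr, fun p hp' => hb p (List.mem_cons_of_mem _ hp'), ?_⟩
  intro m
  by_cases hm : e ≤ m
  · have : f m = covOf ((s, e) :: r) m := hc m
    simp only [covOf, List.any_cons] at this
    have hhead : decide ((s, e).1 ≤ m ∧ m < (s, e).2) = false := by
      simp only [decide_eq_false_iff_not]
      omega
    rw [hhead, Bool.false_or] at this
    simp [hm, this, covOf]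
  · simp only [decide_eq_false hm, Bool.false_and]
    symm
    unfold covOf
    apply List.any_eq_false.mpr
    intro q hq
    have := hcr q hq
    simp only [decide_eq_true_eq]
    omega

theorem canon_unique : ∀ (M1 : List (Int × Int)) (f : Int → Bool) (M2 : List (Int × Int)),
    Canon f M1 → Canon f M2 → M1 = M2 := by
  intro M1
  induction M1 with
  | nil =>
    intro f M2 h1 h2
    rcases M2 with _ | ⟨⟨s, e⟩, r⟩
    · rfl
    · have ht := canon_head_true h2
      rw [h1.2.2 s] at ht
      simp [covOf] at ht
  | cons pe r1 ih =>
    intro f M2 h1 h2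
    obtain ⟨s, e⟩ := pe
    rcases M2 with _ | ⟨⟨s', e'⟩, r2⟩
    · have ht := canon_head_true h1
      rw [h2.2.2 s] at ht
      simp [covOf] at ht
    · have hs : s = s' :=
        le_antisymm (canon_lb h1 s' (canon_head_true h2)) (canon_lb h2 s (canon_head_true h1))
      subst hs
      have hse := (h1.2.1 (s, e) (List.mem_cons_self)).2
      have hse' := (h2.2.1 (s, e') (List.mem_cons_self)).2
      have he : e = e' := by
        rcases lt_trichotomy e e' with h | h | h
        · have := canon_end_false h1
          rw [canon_mid_true h2 e (by omega) h] at this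
          exact absurd this (by simp)
        · exact h
        · have := canon_end_false h2
          rw [canon_mid_true h1 e' (by omega) h] at this
          exact absurd this (by simp)
      subst he
      have := ih (fun m => decide (e ≤ m) && f m) r2 (canon_tail h1) (canon_tail h2)
      rw [this]

theorem mergeCanon : ∀ (S : List (Int × Int)) (acc : List (Int × Int)) (g : Int → Bool),
    Canon g acc →
    S.Pairwise (fun p q => p.1 ≤ q.1) →
    (∀ p ∈ S, 0 ≤ p.1 ∧ p.1 < p.2) →
    (∀ q ∈ acc, ∀ p ∈ S, q.1 ≤ p.1) →
    Canon (fun m => g m || covOf S m) (S.foldl mergeStepA acc) := by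
  intro S
  induction S with
  | nil =>
    intro acc g hC _ _ _
    exact canon_congr (fun m => by simp [covOf]) hC
  | cons p S' ih =>
    intro acc g hC hpw hbd hst
    rw [List.foldl_cons]
    obtain ⟨hpw1, hpw2⟩ := List.pairwise_cons.mp hpw
    obtain ⟨hP, hB, hCov⟩ := hC
    have hpb : 0 ≤ p.1 ∧ p.1 < p.2 := hbd p List.mem_cons_self
    -- one merge step preserves canonicity for the enlarged coverage
    have step : Canon (fun m => g m || decide (p.1 ≤ m ∧ m < p.2)) (mergeStepA acc p) ∧
        (∀ x ∈ mergeStepA acc p, ∀ r ∈ S', x.1 ≤ r.1) := by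
      rcases List.eq_nil_or_concat acc with hnil | ⟨init, q, hacc⟩
      · subst hnil
        have hacc' : mergeStepA [] p = [p] := rfl
        rw [hacc']
        refine ⟨⟨List.pairwise_singleton _ _, by simpa using hpb, ?_⟩, ?_⟩
        · intro m
          have h0 : g m = false := by rw [hCov m]; rfl
          simp [h0, covOf]
        · intro x hx r hr
          simp only [List.mem_singleton] at hx
          subst hx
          exact hpw1 r hr
      · rw [List.concat_eq_append] at hacc
        subst hacc
        have hqb : 0 ≤ q.1 ∧ q.1 < q.2 := hB q (by simp)
        obtain ⟨hPi, _, hcross⟩ := List.pairwise_append.mp hP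
        have hcross' : ∀ x ∈ init, x.2 < q.1 := fun x hx => hcross x hx q (by simp)
        have hcov' : ∀ m, g m = (covOf init m || decide (q.1 ≤ m ∧ m < q.2)) := by
          intro m
          rw [hCov m]
          simp [covOf, List.any_append]
        by_cases hgt : p.1 > q.2
        · have hacc' : mergeStepA (init ++ [q]) p = (init ++ [q]) ++ [p] := by
            unfold mergeStepA
            rw [List.getLast?_concat]
            simp [hgt]
          rw [hacc']
          refine ⟨⟨?_, ?_, ?_⟩, ?_⟩
          · refine List.pairwise_append.mpr ⟨hP, List.pairwise_singleton _ _, ?_⟩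
            intro x hx y hy
            simp only [List.mem_singleton] at hy
            subst hy
            rcases List.mem_append.mp hx with h | h
            · have := hcross' x h
              omega
            · simp only [List.mem_singleton] at h
              subst h
              omega
          · intro x hx
            rcases List.mem_append.mp hx with h | h
            · exact hB x h
            · simp only [List.mem_singleton] at h
              subst h
              exact hpb
          · intro m
            change (g m || decide (p.1 ≤ m ∧ m < p.2)) = _
            rw [hCov m]
            simp [covOf, List.any_append, Bool.or_assoc]
          · intro x hx r hr
            rcases List.mem_append.mp hx with h | h
            · exact hst x h r (List.mem_cons_of_mem _ hr)
            · simp only [List.mem_singleton] at h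
              subst h
              exact hpw1 r hr
        · have hq1p : q.1 ≤ p.1 := hst q (by simp) p List.mem_cons_self
          have hacc' : mergeStepA (init ++ [q]) p = init ++ [(q.1, max q.2 p.2)] := by
            unfold mergeStepA
            rw [List.getLast?_concat]
            simp [hgt]
          rw [hacc']
          refine ⟨⟨?_, ?_, ?_⟩, ?_⟩
          · refine List.pairwise_append.mpr ⟨hPi, List.pairwise_singleton _ _, ?_⟩
            intro x hx y hy
            simp only [List.mem_singleton] at hy
            subst hy
            exact hcross' x hx
          · intro x hx
            rcases List.mem_append.mp hx with h | h
            · exact hB x (List.mem_append.mpr (Or.inl h))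
            · simp only [List.mem_singleton] at h
              subst h
              constructor
              · exact hqb.1
              · simp only []
                omega
          · intro m
            change (g m || decide (p.1 ≤ m ∧ m < p.2)) = _
            rw [hcov' m]
            have hkey : (decide (q.1 ≤ m ∧ m < q.2) || decide (p.1 ≤ m ∧ m < p.2))
                = decide (q.1 ≤ m ∧ m < max q.2 p.2) := by
              rw [← Bool.decide_or, decide_eq_decide]
              omega
            simp only [covOf, List.any_append, List.any_cons, List.any_nil]
            rw [Bool.or_assoc, hkey]
            simp
          · intro x hx r hr
            rcases List.mem_append.mp hx with h | h
            · exact hst x (List.mem_append.mpr (Or.inl h)) r (List.mem_cons_of_mem _ hr)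
            · simp only [List.mem_singleton] at h
              subst h
              exact hst q (by simp) r (List.mem_cons_of_mem _ hr)
    have main := ih (mergeStepA acc p) (fun m => g m || decide (p.1 ≤ m ∧ m < p.2)) step.1 hpw2
      (fun x hx => hbd x (List.mem_cons_of_mem _ hx)) step.2
    refine canon_congr (fun m => ?_) main
    simp [covOf, Bool.or_assoc]

-- the invariant of B's scan after processing minutes 0 .. n-1
def RInv (f : Int → Bool) (n : Nat) (st : List (Int × Int) × Option Int) : Prop :=
  st.1.Pairwise (fun p q => p.2 < q.1) ∧
  (match st.2 with
   | none =>
      (∀ p ∈ st.1, 0 ≤ p.1 ∧ p.1 < p.2 ∧ p.2 < (n : Int)) ∧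
      (∀ m : Int, 0 ≤ m → m < (n : Int) → (decide (0 ≤ m ∧ m < 24 * 60) && f m) = covOf st.1 m)
   | some s =>
      (∀ p ∈ st.1, 0 ≤ p.1 ∧ p.1 < p.2 ∧ p.2 < s) ∧
      0 ≤ s ∧ s < (n : Int) ∧
      (∀ m : Int, 0 ≤ m → m < s → (decide (0 ≤ m ∧ m < 24 * 60) && f m) = covOf st.1 m) ∧
      (∀ m : Int, s ≤ m → m < (n : Int) → (decide (0 ≤ m ∧ m < 24 * 60) && f m) = true))

theorem rinv_step (f : Int → Bool) (n : Nat) (st : List (Int × Int) × Option Int)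
    (h : RInv f n st) : RInv f (n + 1) (runsStep f st n) := by
  obtain ⟨runs, os⟩ := st
  have hc : (decide (n < 24 * 60) && f (n : Int))
      = (decide (0 ≤ (n : Int) ∧ (n : Int) < 24 * 60) && f (n : Int)) := by
    have h : (decide (n < 24 * 60)) = (decide (0 ≤ (n : Int) ∧ (n : Int) < 24 * 60)) := by
      rw [decide_eq_decide]
      omega
    rw [h]
  rcases os with _ | s
  · obtain ⟨hP, hb, hcov⟩ := h
    by_cases hcn : (decide (n < 24 * 60) && f (n : Int)) = true
    · have hstep : runsStep f (runs, none) n = (runs, some (n : Int)) := by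
        unfold runsStep
        simp [hcn]
      rw [hstep]
      refine ⟨hP, fun p hp => hb p hp, by omega, by push_cast; omega, fun m h0 hm => hcov m h0 hm, ?_⟩
      intro m h1 h2
      have hm : m = (n : Int) := by push_cast at h2; omega
      subst hm
      rw [← hc]
      exact hcn
    · have hstep : runsStep f (runs, none) n = (runs, none) := by
        unfold runsStep
        simp [hcn]
      rw [hstep]
      refine ⟨hP, fun p hp => ⟨(hb p hp).1, (hb p hp).2.1, by have := (hb p hp).2.2; push_cast; omega⟩, ?_⟩
      intro m h0 hm
      by_cases hlt : m < (n : Int)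
      · exact hcov m h0 hlt
      · have hm' : m = (n : Int) := by push_cast at hm; omega
        subst hm'
        rw [← hc, (Bool.not_eq_true _).mp hcn]
        symm
        apply List.any_eq_false.mpr
        intro p hp
        have := (hb p hp).2.2
        simp only [decide_eq_true_eq]
        omega
  · obtain ⟨hP, hb, hs0, hsn, hcov, hcovd⟩ := h
    by_cases hcn : (decide (n < 24 * 60) && f (n : Int)) = true
    · have hstep : runsStep f (runs, some s) n = (runs, some s) := by
        unfold runsStep
        simp [hcn]
      rw [hstep]
      refine ⟨hP, hb, hs0, by push_cast; omega, hcov, ?_⟩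
      intro m h1 h2
      by_cases hlt : m < (n : Int)
      · exact hcovd m h1 hlt
      · have hm' : m = (n : Int) := by push_cast at h2; omega
        subst hm'
        rw [← hc]
        exact hcn
    · have hstep : runsStep f (runs, some s) n = (runs ++ [(s, (n : Int))], none) := by
        unfold runsStep
        simp [hcn]
      rw [hstep]
      refine ⟨?_, ?_, ?_⟩
      · refine List.pairwise_append.mpr ⟨hP, List.pairwise_singleton _ _, ?_⟩
        intro x hx y hy
        simp only [List.mem_singleton] at hy
        subst hy
        exact (hb x hx).2.2
      · intro p hp
        rcases List.mem_append.mp hp with hp' | hp'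
        · have := hb p hp'
          push_cast
          omega
        · simp only [List.mem_singleton] at hp'
          subst hp'
          push_cast
          omega
      · intro m h0 hm
        simp only [covOf, List.any_append, List.any_cons, List.any_nil, Bool.or_false]
        by_cases hms : m < s
        · have hnew : decide ((s, (n : Int)).1 ≤ m ∧ m < (s, (n : Int)).2) = false := by
            simp only [decide_eq_false_iff_not]
            omega
          rw [hnew, Bool.or_false]
          exact hcov m h0 hms
        · by_cases hmn : m < (n : Int)
          · have h1 : (decide (0 ≤ m ∧ m < 24 * 60) && f m) = true := hcovd m (by omega) hmn
            rw [h1]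
            symm
            have hnew : decide ((s, (n : Int)).1 ≤ m ∧ m < (s, (n : Int)).2) = true := by
              simp only [decide_eq_true_eq]
              omega
            rw [hnew]
            simp
          · have hm' : m = (n : Int) := by push_cast at hm; omega
            subst hm'
            rw [← hc, (Bool.not_eq_true _).mp hcn]
            symm
            have hnew : decide ((s, (n : Int)).1 ≤ (n : Int) ∧ (n : Int) < (s, (n : Int)).2) = false := by
              simp only [decide_eq_false_iff_not]
              omega
            rw [hnew, Bool.or_false]
            apply List.any_eq_false.mpr
            intro p hp
            have := (hb p hp).2.2
            simp only [decide_eq_true_eq]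
            omega

theorem rinv_all (f : Int → Bool) : ∀ n : Nat,
    RInv f n ((List.range n).foldl (runsStep f) ([], none))
  | 0 => by
    refine ⟨List.Pairwise.nil, by simp, ?_⟩
    intro m h0 hm
    simp only [Nat.cast_zero] at hm
    omega
  | n + 1 => by
    rw [List.range_succ, List.foldl_append, List.foldl_cons, List.foldl_nil]
    exact rinv_step f n _ (rinv_all f n)

theorem runsCanon (f : Int → Bool) :
    Canon (fun m => decide (0 ≤ m ∧ m < 24 * 60) && f m) (runsOf f) := by
  rcases hst : (List.range (24 * 60 + 1)).foldl (runsStep f) ([], none) with ⟨runs, os⟩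
  have hI := rinv_all f (24 * 60 + 1)
  rw [hst] at hI
  have hruns : runsOf f = runs := by
    unfold runsOf
    rw [hst]
  rcases os with _ | s
  · obtain ⟨hP, hb, hcov⟩ := hI
    rw [hruns]
    refine ⟨hP, fun p hp => ⟨(hb p hp).1, (hb p hp).2.1⟩, ?_⟩
    intro m
    by_cases h0 : 0 ≤ m ∧ m < ((24 * 60 + 1 : Nat) : Int)
    · exact hcov m h0.1 h0.2
    · have hL : (decide (0 ≤ m ∧ m < 24 * 60) && f m) = false := by
        have h' : ¬ (0 ≤ m ∧ m < 24 * 60) := by push_cast at h0; omega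
        rw [decide_eq_false h', Bool.false_and]
      show (decide (0 ≤ m ∧ m < 24 * 60) && f m) = covOf runs m
      rw [hL]
      symm
      apply List.any_eq_false.mpr
      intro p hp
      have := hb p hp
      simp only [decide_eq_true_eq]
      push_cast at h0 this
      omega
  · exfalso
    obtain ⟨hP, hb, hs0, hsn, hcov, hcovd⟩ := hI
    have h1 := hcovd 1440 (by omega) (by omega)
    simp at h1

theorem tsm?_bounds {s : String} {v : Int} (h : tsm? s = some v) : 0 ≤ v ∧ v ≤ 24 * 60 := by
  unfold tsm? at h
  rcases h1 : PySem.Int.ofStr? (PySem.List.pyGetD ((PySem.Str.split? (PySem.Str.strip s) ":").getD []) 0 "") with _ | hh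
  · simp [h1] at h
  · rcases h2 : (if ((PySem.Str.split? (PySem.Str.strip s) ":").getD []).length > 1 then
        PySem.Int.ofStr? (PySem.List.pyGetD ((PySem.Str.split? (PySem.Str.strip s) ":").getD []) 1 "") else some 0) with _ | mm
    · simp [h1, h2] at h
    · simp [h1, h2] at h
      omega

-- the per-day equivalence: A's sort+merge equals B's coverage-run scan
theorem day_eq (L : List (Int × Int)) (hb : ∀ p ∈ L, 0 ≤ p.1 ∧ p.1 < p.2 ∧ p.2 ≤ 24 * 60) :
    (PySem.List.sorted L (fun x => x.1) false).foldl mergeStepA [] = runsOf (covOf L) := by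
  have hperm : (PySem.List.sorted L (fun x => x.1) false).Perm L := PySem.List.sorted_perm L (fun x => x.1) false
  have hcovSL : ∀ m, covOf (PySem.List.sorted L (fun x => x.1) false) m = covOf L m := by
    intro m
    unfold covOf
    exact hperm.any_eq
  have hpw : (PySem.List.sorted L (fun x => x.1) false).Pairwise (fun p q => p.1 ≤ q.1) :=
    PySem.List.sorted_pairwise L (fun x => x.1)
  have hbS : ∀ p ∈ PySem.List.sorted L (fun x => x.1) false, 0 ≤ p.1 ∧ p.1 < p.2 := by
    intro p hp
    have := hb p (by rwa [PySem.List.mem_sorted] at hp)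
    exact ⟨this.1, this.2.1⟩
  have h1 := mergeCanon (PySem.List.sorted L (fun x => x.1) false) [] (fun _ => false)
      ⟨List.Pairwise.nil, by simp, fun m => rfl⟩ hpw hbS (by simp)
  have hA : Canon (covOf L) ((PySem.List.sorted L (fun x => x.1) false).foldl mergeStepA []) := by
    refine canon_congr (fun m => ?_) h1
    simp [hcovSL m]
  have hB : Canon (covOf L) (runsOf (covOf L)) := by
    refine canon_congr (fun m => ?_) (runsCanon (covOf L))
    change (decide (0 ≤ m ∧ m < 24 * 60) && covOf L m) = covOf L m
    cases hcase : covOf L m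
    · simp
    · unfold covOf at hcase
      obtain ⟨p, hp, hcov⟩ := List.any_eq_true.mp hcase
      simp only [decide_eq_true_eq] at hcov
      have := hb p hp
      have hd : decide (0 ≤ m ∧ m < 24 * 60) = true := by
        simp only [decide_eq_true_eq]
        omega
      rw [hd]
      simp
  exact canon_unique _ (covOf L) _ hA hB

-- the fixed seven-day dictionary, parameterised by its per-day value
def mkD {α : Type} (H : Int → α) : PySem.Dict Int α :=
  PySem.Dict.mk [(0, H 0), (1, H 1), (2, H 2), (3, H 3), (4, H 4), (5, H 5), (6, H 6)]

theorem modify_mkD {α : Type} (H : Int → α) (d : Int) (hd : 0 ≤ d ∧ d ≤ 6) (d0 : α) (F : α → α) :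
    (mkD H).modify d d0 F = mkD (fun i => if i = d then F (H i) else H i) := by
  obtain ⟨h1, h2⟩ := hd
  interval_cases d <;> rfl

theorem mark_cov (L : List (Int × Int)) (a b : Int) :
    markB (covOf L) a b = covOf (L ++ [(a, b)]) := by
  funext m
  by_cases h : a ≤ m ∧ m < b <;> simp [markB, covOf, h]

def BoundsG (G : Int → List (Int × Int)) : Prop :=
  ∀ i, ∀ p ∈ G i, 0 ≤ p.1 ∧ p.1 < p.2 ∧ p.2 ≤ 24 * 60

theorem inner_sim (d : Int) (hd : 0 ≤ d ∧ d ≤ 6) :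
    ∀ (slots : List (List String)) (G : Int → List (Int × Int)), BoundsG G →
    ∃ G', BoundsG G' ∧
      slots.foldl (slotStepA d) (mkD G) = mkD G' ∧
      slots.foldl (slotStepB d) (mkD (fun i => covOf (G i))) = mkD (fun i => covOf (G' i)) := by
  intro slots
  induction slots with
  | nil => exact fun G hG => ⟨G, hG, rfl, rfl⟩
  | cons slot rest ih =>
    intro G hG
    rw [List.foldl_cons, List.foldl_cons]
    by_cases hlen : slot.length < 2
    · rw [show slotStepA d (mkD G) slot = mkD G by simp [slotStepA, hlen],
          show slotStepB d (mkD fun i => covOf (G i)) slot = mkD fun i => covOf (G i) by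
            simp [slotStepB, hlen]]
      exact ih G hG
    · rcases h0 : tsm? (PySem.List.pyGetD slot 0 "") with _ | a <;>
        rcases h1 : tsm? (PySem.List.pyGetD slot 1 "") with _ | b
      · rw [show slotStepA d (mkD G) slot = mkD G by simp [slotStepA, hlen, h0, h1],
            show slotStepB d (mkD fun i => covOf (G i)) slot = mkD fun i => covOf (G i) by
              simp [slotStepB, hlen, h0, h1]]
        exact ih G hG
      · rw [show slotStepA d (mkD G) slot = mkD G by simp [slotStepA, hlen, h0, h1],
            show slotStepB d (mkD fun i => covOf (G i)) slot = mkD fun i => covOf (G i) by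
              simp [slotStepB, hlen, h0, h1]]
        exact ih G hG
      · rw [show slotStepA d (mkD G) slot = mkD G by simp [slotStepA, hlen, h0, h1],
            show slotStepB d (mkD fun i => covOf (G i)) slot = mkD fun i => covOf (G i) by
              simp [slotStepB, hlen, h0, h1]]
        exact ih G hG
      · by_cases hba : b ≤ a
        · rw [show slotStepA d (mkD G) slot = mkD G by simp [slotStepA, hlen, h0, h1, hba],
              show slotStepB d (mkD fun i => covOf (G i)) slot = mkD fun i => covOf (G i) by
                simp [slotStepB, hlen, h0, h1, hba]]
          exact ih G hG
        · have hA : slotStepA d (mkD G) slot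
              = mkD (fun i => if i = d then G i ++ [(a, b)] else G i) := by
            simp only [slotStepA, hlen, if_false, h0, h1]
            rw [if_neg hba, modify_mkD G d hd [] (fun l => l ++ [(a, b)])]
          have hB : slotStepB d (mkD fun i => covOf (G i)) slot
              = mkD (fun i => covOf ((fun i => if i = d then G i ++ [(a, b)] else G i) i)) := by
            simp only [slotStepB, hlen, if_false, h0, h1]
            rw [if_neg hba,
              modify_mkD (fun i => covOf (G i)) d hd (fun _ => false) (fun f => markB f a b)]
            exact congrArg mkD (by funext i; by_cases hi : i = d <;> simp [hi, mark_cov])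
          rw [hA, hB]
          refine ih _ ?_
          intro i p hp
          by_cases hi : i = d
          · simp only [hi, if_true] at hp
            rcases List.mem_append.mp hp with h | h
            · exact hG d p h
            · simp only [List.mem_singleton] at h
              subst h
              have ha := tsm?_bounds h0
              have hbb := tsm?_bounds h1
              refine ⟨ha.1, by omega, hbb.2⟩
          · simp only [hi] at hp
            exact hG i p hp

theorem outer_sim : ∀ (raw : List (String × List (List String))) (G : Int → List (Int × Int)),
    BoundsG G →
    ∃ G', BoundsG G' ∧
      raw.foldl dayStepA (mkD G) = mkD G' ∧
      raw.foldl dayStepB (mkD (fun i => covOf (G i))) = mkD (fun i => covOf (G' i)) := by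
  intro raw
  induction raw with
  | nil => exact fun G hG => ⟨G, hG, rfl, rfl⟩
  | cons kv rest ih =>
    intro G hG
    rw [List.foldl_cons, List.foldl_cons]
    rcases hk : PySem.Int.ofStr? kv.1 with _ | d
    · rw [show dayStepA (mkD G) kv = mkD G by simp [dayStepA, hk],
          show dayStepB (mkD fun i => covOf (G i)) kv = mkD fun i => covOf (G i) by
            simp [dayStepB, hk]]
      exact ih G hG
    · by_cases hd : d < 0 ∨ d > 6
      · rw [show dayStepA (mkD G) kv = mkD G by simp [dayStepA, hk, hd],
            show dayStepB (mkD fun i => covOf (G i)) kv = mkD fun i => covOf (G i) by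
              simp [dayStepB, hk, hd]]
        exact ih G hG
      · have hd' : 0 ≤ d ∧ d ≤ 6 := by omega
        obtain ⟨G1, hG1, hA1, hB1⟩ := inner_sim d hd' kv.2 G hG
        rw [show dayStepA (mkD G) kv = kv.2.foldl (slotStepA d) (mkD G) by
              simp [dayStepA, hk, hd],
            show dayStepB (mkD fun i => covOf (G i)) kv
                = kv.2.foldl (slotStepB d) (mkD fun i => covOf (G i)) by
              simp [dayStepB, hk, hd],
            hA1, hB1]
        exact ih G1 hG1

-- ===== VERDICT (by name: the statement is the Claim_ definition above) =====
theorem normalize_availability_payload_spec : Claim_equal_normalize_availability_payload := by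
  intro raw _ _
  unfold Spec_normalize_availability_payload normalize_availability_payload
    normalize_availability_payload_alt
  obtain ⟨G, hG, hA, hB⟩ := outer_sim raw (fun _ => []) (by intro i p hp; simp at hp)
  rw [show initA = mkD (fun _ => ([] : List (Int × Int))) from rfl, hA,
      show initB = mkD (fun i => covOf ((fun _ => ([] : List (Int × Int))) i)) from rfl, hB,
      show PySem.List.pyRange 0 7 1 = [0, 1, 2, 3, 4, 5, 6] from rfl]
  show [((0:Int), (PySem.List.sorted (G 0) (fun x => x.1) false).foldl mergeStepA []),
        (1, (PySem.List.sorted (G 1) (fun x => x.1) false).foldl mergeStepA []),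
        (2, (PySem.List.sorted (G 2) (fun x => x.1) false).foldl mergeStepA []),
        (3, (PySem.List.sorted (G 3) (fun x => x.1) false).foldl mergeStepA []),
        (4, (PySem.List.sorted (G 4) (fun x => x.1) false).foldl mergeStepA []),
        (5, (PySem.List.sorted (G 5) (fun x => x.1) false).foldl mergeStepA []),
        (6, (PySem.List.sorted (G 6) (fun x => x.1) false).foldl mergeStepA [])]
      = [((0:Int), runsOf (covOf (G 0))), (1, runsOf (covOf (G 1))), (2, runsOf (covOf (G 2))),
         (3, runsOf (covOf (G 3))), (4, runsOf (covOf (G 4))), (5, runsOf (covOf (G 5))),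
         (6, runsOf (covOf (G 6)))]
  rw [day_eq (G 0) (hG 0), day_eq (G 1) (hG 1), day_eq (G 2) (hG 2), day_eq (G 3) (hG 3),
      day_eq (G 4) (hG 4), day_eq (G 5) (hG 5), day_eq (G 6) (hG 6)]
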